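-- pv_equiv track=rewrite | github.com/Adrian-Garcia/Python-Algorithms | interviews/amazon/getKNumber.py | getKNumber
-- ===== SOURCE A (Python) =====
-- def additionFormula(n: int) -> int:
--     # 6 * 7 // 2 = 21
--     return n * (n + 1) // 2
--
-- def validNumber(n: int) -> bool:
--     return not (n < 0 and type(n) != int)
--
-- def getKNumber(n: int) -> int:
--     if not validNumber(n):
--         return -2
--
--     maxAdditionalFormula = additionFormula(n)
--
--     for i in range(n):
--         currentNumber = i + 1
--         left = additionFormula(currentNumber - 1)
--         right = maxAdditionalFormula - additionFormula(currentNumber)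
--
--         if left == right:
--             return currentNumber
--
--     return -1
-- ===== SOURCE B (Python) =====
-- def getKNumber(n: int) -> int:
--     # Binary search for k in [1, n] with k*k == n*(n+1)//2 (prefix sum below k
--     # equals suffix sum above k); k*k is increasing on the positive range.
--     m = n * (n + 1) // 2
--     lo, hi = 1, n
--     while lo <= hi:
--         mid = (lo + hi) // 2
--         s = mid * mid
--         if s == m:
--             return mid
--         if s < m:
--             lo = mid + 1
--         else:
--             hi = mid - 1
--     return -1
-- ===== Notes on version B (the rewrite author's own statement) =====
-- stated objective: faster
-- what changed: Replaces the linear scan over all candidates with a binary search for the unique k with k*k = n*(n+1)//2, exploiting that the square is increasing on the searched range.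
import Mathlib
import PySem

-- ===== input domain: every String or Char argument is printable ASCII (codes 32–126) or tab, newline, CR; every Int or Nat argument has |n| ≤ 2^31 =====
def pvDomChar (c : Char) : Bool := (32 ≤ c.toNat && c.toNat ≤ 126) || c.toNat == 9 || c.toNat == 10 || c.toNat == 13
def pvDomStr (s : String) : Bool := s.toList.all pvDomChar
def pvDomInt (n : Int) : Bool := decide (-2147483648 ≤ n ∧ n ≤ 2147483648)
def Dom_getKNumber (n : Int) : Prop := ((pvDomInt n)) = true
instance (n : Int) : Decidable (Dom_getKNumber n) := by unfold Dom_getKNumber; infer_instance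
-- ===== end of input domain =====

-- B replaces A's linear scan by a binary search for the unique k with k*k = n*(n+1)//2 (objective: faster).

-- ===== PORT A =====
def additionFormula (n : Int) : Int := PySem.Int.floordiv (n * (n + 1)) 2

def validNumber (n : Int) : Bool := !(decide (n < 0) && false)

-- the 'for i in range(n)' loop with its early return
def getKNumberGo (m : Int) : List Int → Int
  | [] => -1
  | i :: rest =>
    let currentNumber := i + 1
    let left := additionFormula (currentNumber - 1)
    let right := m - additionFormula currentNumber
    if left == right then currentNumber else getKNumberGo m rest

def getKNumber (n : Int) : Int :=
  if !validNumber n then -2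
  else getKNumberGo (additionFormula n) (PySem.List.pyRange 0 n 1)

-- ===== PORT B =====
-- the 'while lo <= hi' binary-search loop of Source B
def bsearchB (m lo hi : Int) : Int :=
  if h : lo ≤ hi then
    let mid := PySem.Int.floordiv (lo + hi) 2
    let s := mid * mid
    if s == m then mid
    else if s < m then bsearchB m (mid + 1) hi
    else bsearchB m lo (mid - 1)
  else -1
termination_by (hi - lo + 1).toNat
decreasing_by
  · have := PySem.Int.floordiv_two_mid_bounds h; omega
  · have := PySem.Int.floordiv_two_mid_bounds h; omega

def getKNumber_alt (n : Int) : Int :=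
  let m := PySem.Int.floordiv (n * (n + 1)) 2
  bsearchB m 1 n

-- ===== PRECONDITION & SPEC =====
def Spec_getKNumber (n : Int) (out : Int) : Prop := out = getKNumber_alt n
instance (n : Int) (out : Int) : Decidable (Spec_getKNumber n out) := by unfold Spec_getKNumber; infer_instance

-- ===== CLAIM (what is proved, stated in full; the proofs are below) =====
def Claim_equal_getKNumber : Prop := ∀ (n : Int), Dom_getKNumber n → Spec_getKNumber n (getKNumber n)

-- ===== LEMMAS AND PROOFS =====

theorem two_addF (k : Int) : 2 * additionFormula k = k * (k + 1) := by
  unfold additionFormula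
  rw [PySem.Int.floordiv_eq_ediv_of_pos (by norm_num)]
  exact Int.mul_ediv_cancel' (Int.even_mul_succ_self k).two_dvd

theorem condA (m cur : Int) :
    additionFormula (cur - 1) = m - additionFormula cur ↔ cur * cur = m := by
  have h1 := two_addF (cur - 1)
  have h2 := two_addF cur
  constructor <;> intro h
  · nlinarith [h1, h2, h]
  · nlinarith [h1, h2, h]

theorem condA_bool (m cur : Int) :
    (additionFormula (cur - 1) == m - additionFormula cur) = (cur * cur == m) := by
  rw [Bool.eq_iff_iff]
  simp only [beq_iff_eq]
  exact condA m cur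

theorem goA_found (m : Int) : ∀ (d : Nat) (a b k : Int), (b - a).toNat ≤ d → 0 ≤ a →
    a + 1 ≤ k → k ≤ b → k * k = m →
    getKNumberGo m (PySem.List.pyRange a b 1) = k := by
  intro d
  induction d with
  | zero => intro a b k hd _ hk1 hk2 _; omega
  | succ d ih =>
    intro a b k hd ha hk1 hk2 hk3
    have hab : a < b := by omega
    rw [PySem.List.pyRange_one_cons hab]
    simp only [getKNumberGo, condA_bool]
    by_cases hc : (a + 1) * (a + 1) = m
    · have : a + 1 = k := by nlinarith [hc, hk3]
      rw [if_pos (by simp [hc])]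
      exact this
    · have hlt : a + 1 < k := by
        rcases eq_or_lt_of_le hk1 with h | h
        · exact absurd (h ▸ hk3) hc
        · exact h
      rw [if_neg (by simp [hc])]
      exact ih (a + 1) b k (by omega) (by omega) (by omega) hk2 hk3

theorem goA_none (m : Int) : ∀ (d : Nat) (a b : Int), (b - a).toNat ≤ d →
    (∀ k, a + 1 ≤ k → k ≤ b → k * k ≠ m) →
    getKNumberGo m (PySem.List.pyRange a b 1) = -1 := by
  intro d
  induction d with
  | zero =>
    intro a b hd _
    rw [PySem.List.pyRange_one_eq_nil (by omega)]
    rfl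
  | succ d ih =>
    intro a b hd hno
    by_cases hab : a < b
    · rw [PySem.List.pyRange_one_cons hab]
      simp only [getKNumberGo, condA_bool]
      have hc : (a + 1) * (a + 1) ≠ m := hno (a + 1) (by omega) (by omega)
      simp only [beq_iff_eq, if_neg hc]
      exact ih (a + 1) b (by omega) (fun k h1 h2 => hno k (by omega) h2)
    · rw [PySem.List.pyRange_one_eq_nil (by omega)]
      rfl

theorem bs_found (m : Int) : ∀ (d : Nat) (lo hi k : Int), (hi - lo + 1).toNat ≤ d →
    0 ≤ lo → lo ≤ k → k ≤ hi → k * k = m → bsearchB m lo hi = k := by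
  intro d
  induction d with
  | zero => intro lo hi k hd _ hk1 hk2 _; omega
  | succ d ih =>
    intro lo hi k hd hlo hk1 hk2 hk3
    have hle : lo ≤ hi := le_trans hk1 hk2
    rw [bsearchB]
    simp only [dif_pos hle]
    have hmid := PySem.Int.floordiv_two_mid_bounds hle
    set mid := PySem.Int.floordiv (lo + hi) 2 with hmd
    by_cases hc : mid * mid = m
    · have : mid = k := by
        rcases lt_trichotomy mid k with h | h | h
        · nlinarith [hc, hk3]
        · exact h
        · nlinarith [hc, hk3]
      rw [if_pos (by simp [hc])]
      exact this
    · simp only [beq_iff_eq, if_neg hc]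
      by_cases hlt : mid * mid < m
      · have hmk : mid < k := by nlinarith [hk3]
        rw [if_pos hlt]
        exact ih (mid + 1) hi k (by omega) (by omega) (by omega) hk2 hk3
      · have hkm : k < mid := by
          rcases lt_trichotomy k mid with h | h | h
          · exact h
          · exact absurd (h ▸ hk3) hc
          · exfalso; exact hlt (by nlinarith [hk3])
        rw [if_neg hlt]
        exact ih lo (mid - 1) k (by omega) hlo hk1 (by omega) hk3

theorem bs_none (m : Int) : ∀ (d : Nat) (lo hi : Int), (hi - lo + 1).toNat ≤ d →
    (∀ k, lo ≤ k → k ≤ hi → k * k ≠ m) → bsearchB m lo hi = -1 := by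
  intro d
  induction d with
  | zero =>
    intro lo hi hd _
    rw [bsearchB]
    rw [dif_neg (by omega)]
  | succ d ih =>
    intro lo hi hd hno
    by_cases hle : lo ≤ hi
    · rw [bsearchB]
      simp only [dif_pos hle]
      have hmid := PySem.Int.floordiv_two_mid_bounds hle
      set mid := PySem.Int.floordiv (lo + hi) 2 with hmd
      have hc : mid * mid ≠ m := hno mid hmid.1 hmid.2
      simp only [beq_iff_eq, if_neg hc]
      by_cases hlt : mid * mid < m
      · rw [if_pos hlt]
        exact ih (mid + 1) hi (by omega) (fun k h1 h2 => hno k (by omega) h2)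
      · rw [if_neg hlt]
        exact ih lo (mid - 1) (by omega) (fun k h1 h2 => hno k h1 (by omega))
    · rw [bsearchB]
      rw [dif_neg hle]

-- ===== VERDICT (by name: the statement is the Claim_ definition above) =====
theorem getKNumber_spec : Claim_equal_getKNumber := by
  intro n _
  unfold Spec_getKNumber getKNumber getKNumber_alt
  have hv : validNumber n = true := by simp [validNumber]
  rw [hv]
  simp only [Bool.not_true, Bool.false_eq_true, if_false]
  have hm : additionFormula n = PySem.Int.floordiv (n * (n + 1)) 2 := rfl
  set m := PySem.Int.floordiv (n * (n + 1)) 2 with hmdef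
  rw [hm]
  by_cases h : ∃ k : Int, 1 ≤ k ∧ k ≤ n ∧ k * k = m
  · obtain ⟨k, hk1, hk2, hk3⟩ := h
    rw [goA_found m (n - 0).toNat 0 n k (by omega) (by omega) (by omega) hk2 hk3,
        bs_found m (n - 1 + 1).toNat 1 n k (by omega) (by omega) hk1 hk2 hk3]
  · push Not at h
    rw [goA_none m (n - 0).toNat 0 n (by omega) (fun k h1 h2 => h k (by omega) h2),
        bs_none m (n - 1 + 1).toNat 1 n (by omega) (fun k h1 h2 => h k h1 h2)]
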